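-- pv_equiv track=rewrite | github.com/saraffa13/Outlier | 1/submit.py | can_empty_piles
-- ===== SOURCE A (Python) =====
-- def can_empty_piles(a, b):
--     # Create a 2D DP table with dimensions (a+1) x (b+1)
--     dp = [[False] * (b + 1) for _ in range(a + 1)]
--
--     # Base case: if both piles are empty
--     dp[0][0] = True
--
--     # Fill the DP table
--     for i in range(1, a + 1):
--         for j in range(1, b + 1):
--             if i >= 1 and j >= 2:
--                 dp[i][j] = dp[i - 1][j - 2] or dp[i][j]
--             if i >= 2 and j >= 1:
--                 dp[i][j] = dp[i - 2][j - 1] or dp[i][j]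
--
--     # The result is whether we can empty the given piles
--     return dp[a][b]
-- ===== SOURCE B (Python) =====
-- def can_empty_piles(a, b):
--     # Piles (a, b) can be emptied by (1,2)/(2,1) removals iff the total is a
--     # multiple of 3 and neither pile exceeds twice the other.
--     return (a + b) % 3 == 0 and a <= 2 * b and b <= 2 * a
-- ===== Notes on version B (the rewrite author's own statement) =====
-- stated objective: faster
-- what changed: Replaced the O(a*b) DP table with the O(1) closed-form feasibility test (a+b) % 3 == 0 and a <= 2b and b <= 2a.
-- crash fix: On a < 0 or b < 0 A raises IndexError (the table is empty); B returns False there. — e.g. on can_empty_piles(-1, 0): A raises IndexError, B returns false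
import Mathlib
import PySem

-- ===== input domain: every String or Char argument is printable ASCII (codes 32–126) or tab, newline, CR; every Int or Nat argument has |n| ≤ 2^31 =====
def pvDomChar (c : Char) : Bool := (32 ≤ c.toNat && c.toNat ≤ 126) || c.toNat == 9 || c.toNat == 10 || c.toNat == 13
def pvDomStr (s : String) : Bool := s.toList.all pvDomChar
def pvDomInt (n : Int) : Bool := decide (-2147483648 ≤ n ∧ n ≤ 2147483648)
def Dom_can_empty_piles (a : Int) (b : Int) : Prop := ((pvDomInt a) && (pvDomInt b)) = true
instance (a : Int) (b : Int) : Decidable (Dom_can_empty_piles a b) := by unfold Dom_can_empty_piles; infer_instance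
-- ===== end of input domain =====

-- B replaces A's O(a*b) dynamic-programming table with the O(1) closed-form test
-- (a+b) % 3 == 0 ∧ a ≤ 2b ∧ b ≤ 2a (objective: faster).

-- ===== PORT A =====
-- dp[i][j] read (Python list-of-lists as Array of Arrays; every read the loops
-- perform is guarded non-negative and in range)
def pvGet2 (dp : Array (Array Bool)) (i j : Nat) : Bool := (dp.getD i #[]).getD j false
-- dp[i][j] = v (in-range assignment, as in Python; out-of-range indices never occur inside Pre_)
def pvSet2 (dp : Array (Array Bool)) (i j : Nat) (v : Bool) : Array (Array Bool) :=
  dp.modify i (fun row => row.setIfInBounds j v)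

def can_empty_piles (a : Int) (b : Int) : Bool :=
  -- dp = [[False] * (b + 1) for _ in range(a + 1)]
  let dp := Array.replicate (a + 1).toNat (Array.replicate (b + 1).toNat false)
  -- dp[0][0] = True
  let dp := pvSet2 dp 0 0 true
  -- the two nested for-loops
  let dp := (PySem.List.pyRange 1 (a + 1) 1).foldl (fun dp i =>
    (PySem.List.pyRange 1 (b + 1) 1).foldl (fun dp j =>
      let dp := if 1 ≤ i ∧ 2 ≤ j then
          pvSet2 dp i.toNat j.toNat (pvGet2 dp (i - 1).toNat (j - 2).toNat || pvGet2 dp i.toNat j.toNat)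
        else dp
      let dp := if 2 ≤ i ∧ 1 ≤ j then
          pvSet2 dp i.toNat j.toNat (pvGet2 dp (i - 2).toNat (j - 1).toNat || pvGet2 dp i.toNat j.toNat)
        else dp
      dp) dp) dp
  -- return dp[a][b]
  pvGet2 dp a.toNat b.toNat

-- ===== PORT B =====
def can_empty_piles_alt (a : Int) (b : Int) : Bool :=
  PySem.Int.mod (a + b) 3 == 0 && a ≤ 2 * b && b ≤ 2 * a

-- ===== PRECONDITION & SPEC =====
-- A raises IndexError when a < 0 or b < 0 (the table has no row/column 0 then).
def Pre_can_empty_piles (a : Int) (b : Int) : Prop := 0 ≤ a ∧ 0 ≤ b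
instance (a : Int) (b : Int) : Decidable (Pre_can_empty_piles a b) := by
  unfold Pre_can_empty_piles; infer_instance
def pvWitness_can_empty_piles : Int × Int := (2, 4)

-- On a < 0 or b < 0 A raises IndexError; B returns False there.
def Raises_can_empty_piles (a : Int) (b : Int) : Prop := a < 0 ∨ b < 0
instance (a : Int) (b : Int) : Decidable (Raises_can_empty_piles a b) := by
  unfold Raises_can_empty_piles; infer_instance
def pvRaiseWitness_can_empty_piles : Int × Int := (-1, 0)
def pvRaiseWitnessOut_can_empty_piles : Bool := false

def Spec_can_empty_piles (a : Int) (b : Int) (out : Bool) : Prop := out = can_empty_piles_alt a b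
instance (a : Int) (b : Int) (out : Bool) : Decidable (Spec_can_empty_piles a b out) := by
  unfold Spec_can_empty_piles; infer_instance

-- ===== CLAIM (what is proved, stated in full; the proofs are below) =====
def Claim_equal_can_empty_piles : Prop := ∀ (a : Int) (b : Int), Dom_can_empty_piles a b → Pre_can_empty_piles a b → Spec_can_empty_piles a b (can_empty_piles a b)
-- crash-fix claim, proved at the bottom
def Claim_raises_can_empty_piles : Prop := (∀ (a : Int) (b : Int), Dom_can_empty_piles a b → Raises_can_empty_piles a b → ¬ Pre_can_empty_piles a b) ∧ (Dom_can_empty_piles (pvRaiseWitness_can_empty_piles.1) (pvRaiseWitness_can_empty_piles.2) ∧ Raises_can_empty_piles (pvRaiseWitness_can_empty_piles.1) (pvRaiseWitness_can_empty_piles.2) ∧ can_empty_piles_alt (pvRaiseWitness_can_empty_piles.1) (pvRaiseWitness_can_empty_piles.2) = pvRaiseWitnessOut_can_empty_piles)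

-- ===== LEMMAS AND PROOFS =====

-- the closed form, on Nat
def pvF (i j : Nat) : Bool := decide ((i + j) % 3 = 0 ∧ i ≤ 2 * j ∧ j ≤ 2 * i)

-- Nat-level transcription of one inner-loop body of A (row i, column j; i,j ≥ 1)
def pvStep (i j : Nat) (dp : Array (Array Bool)) : Array (Array Bool) :=
  let dp := if 2 ≤ j then pvSet2 dp i j (pvGet2 dp (i - 1) (j - 2) || pvGet2 dp i j) else dp
  let dp := if 2 ≤ i then pvSet2 dp i j (pvGet2 dp (i - 2) (j - 1) || pvGet2 dp i j) else dp
  dp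

def pvTbl (A B : Nat) : Array (Array Bool) :=
  (List.range A).foldl (fun dp k =>
    (List.range B).foldl (fun dp l => pvStep (k + 1) (l + 1) dp) dp)
    (pvSet2 (Array.replicate (A + 1) (Array.replicate (B + 1) false)) 0 0 true)

theorem pvF_rec (i j : Nat) (hi : 1 ≤ i) (hj : 1 ≤ j) :
    pvF i j = ((if 2 ≤ j then pvF (i - 1) (j - 2) else false)
            || (if 2 ≤ i then pvF (i - 2) (j - 1) else false)) := by
  unfold pvF
  split_ifs <;> rw [Bool.eq_iff_iff] <;>
    simp only [Bool.or_eq_true, Bool.or_false, Bool.false_or, decide_eq_true_eq,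
      Bool.false_eq_true, iff_false] <;>
    omega

theorem pvGetD_modify (dp : Array (Array Bool)) (i k : Nat) (f : Array Bool → Array Bool) :
    (dp.modify i f).getD k #[] = if i = k ∧ k < dp.size then f (dp.getD k #[]) else dp.getD k #[] := by
  rw [Array.getD_eq_getD_getElem?, Array.getElem?_modify]
  by_cases h : i = k
  · subst h
    by_cases hk : i < dp.size
    · rw [if_pos rfl, Array.getElem?_eq_getElem hk, if_pos ⟨rfl, hk⟩]
      simp [Array.getD_eq_getD_getElem?, Array.getElem?_eq_getElem hk]
    · rw [if_pos rfl, Array.getElem?_eq_none (by omega), if_neg (by tauto)]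
      simp [Array.getD_eq_getD_getElem?, Array.getElem?_eq_none (show dp.size ≤ i by omega)]
  · rw [if_neg h, if_neg (by tauto), ← Array.getD_eq_getD_getElem?]

theorem pvGetD_setIfInBounds (r : Array Bool) (j k : Nat) (v : Bool) :
    (r.setIfInBounds j v).getD k false = if j = k ∧ k < r.size then v else r.getD k false := by
  by_cases h : j = k
  · subst h
    by_cases hk : j < r.size
    · rw [Array.getD_eq_getD_getElem?, Array.getElem?_setIfInBounds_self_of_lt hk,
          if_pos ⟨rfl, hk⟩]
      rfl
    · rw [if_neg (by tauto)]
      have hno : r.setIfInBounds j v = r := by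
        unfold Array.setIfInBounds
        rw [dif_neg hk]
      rw [hno]
  · rw [Array.getD_eq_getD_getElem?, Array.getElem?_setIfInBounds_ne h, if_neg (by tauto),
        ← Array.getD_eq_getD_getElem?]

-- the one cell-write lemma everything below uses
theorem pvGet2_set2 (dp : Array (Array Bool)) (i j i' j' : Nat) (v : Bool) :
    pvGet2 (pvSet2 dp i j v) i' j' =
      if i = i' ∧ i' < dp.size ∧ j = j' ∧ j' < (dp.getD i' #[]).size then v
      else pvGet2 dp i' j' := by
  unfold pvGet2 pvSet2
  rw [pvGetD_modify]
  by_cases h : i = i' ∧ i' < dp.size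
  · rw [if_pos h, pvGetD_setIfInBounds]
    by_cases h2 : j = j' ∧ j' < (dp.getD i' #[]).size
    · rw [if_pos ⟨h2.1, h2.2⟩, if_pos ⟨h.1, h.2, h2.1, h2.2⟩]
    · rw [if_neg h2, if_neg (by tauto)]
  · rw [if_neg h, if_neg (by tauto)]

theorem pvGet2_set2_same {dp : Array (Array Bool)} {i j : Nat}
    (hi : i < dp.size) (hj : j < (dp.getD i #[]).size) (v : Bool) :
    pvGet2 (pvSet2 dp i j v) i j = v := by
  rw [pvGet2_set2, if_pos ⟨rfl, hi, rfl, hj⟩]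

theorem pvGet2_set2_ne {dp : Array (Array Bool)} {i j i' j' : Nat}
    (h : i' ≠ i ∨ j' ≠ j) (v : Bool) :
    pvGet2 (pvSet2 dp i j v) i' j' = pvGet2 dp i' j' := by
  rw [pvGet2_set2, if_neg (by tauto)]

-- shape of the table
def pvShape (A B : Nat) (dp : Array (Array Bool)) : Prop :=
  dp.size = A + 1 ∧ ∀ k, k < dp.size → (dp.getD k #[]).size = B + 1

theorem pvShape_row {A B : Nat} {dp : Array (Array Bool)} (h : pvShape A B dp)
    {i : Nat} (hi : i ≤ A) : (dp.getD i #[]).size = B + 1 := by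
  obtain ⟨hl, hr⟩ := h
  exact hr i (by omega)

theorem pvShape_set2 {A B : Nat} {dp : Array (Array Bool)} (h : pvShape A B dp)
    (i j : Nat) (v : Bool) : pvShape A B (pvSet2 dp i j v) := by
  obtain ⟨hl, hr⟩ := h
  refine ⟨by simp [pvSet2, hl], ?_⟩
  intro k hk
  rw [pvSet2, Array.size_modify] at hk
  rw [pvSet2, pvGetD_modify]
  by_cases hik : i = k ∧ k < dp.size
  · rw [if_pos hik, Array.size_setIfInBounds]
    exact hr k hk
  · rw [if_neg hik]
    exact hr k hk

-- invariant after fully processing rows 1..r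
def pvOuterInv (A B r : Nat) (dp : Array (Array Bool)) : Prop :=
  pvShape A B dp ∧ ∀ i j, i ≤ A → j ≤ B →
    pvGet2 dp i j = if i ≤ r then pvF i j else false

-- invariant inside row i after processing columns 1..c
def pvInnerInv (A B i c : Nat) (dp : Array (Array Bool)) : Prop :=
  pvShape A B dp ∧ ∀ i' j, i' ≤ A → j ≤ B →
    pvGet2 dp i' j = if i' < i then pvF i' j
      else if i' = i ∧ 1 ≤ j ∧ j ≤ c then pvF i j else false

theorem pvF_zero_right (i : Nat) (hi : 1 ≤ i) : pvF i 0 = false := by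
  rw [pvF, decide_eq_false_iff_not]
  omega

theorem pvShape_step {A B i j : Nat} {dp : Array (Array Bool)} (h : pvShape A B dp) :
    pvShape A B (pvStep i j dp) := by
  unfold pvStep
  split_ifs <;>
    first
      | exact pvShape_set2 (pvShape_set2 h _ _ _) _ _ _
      | exact pvShape_set2 h _ _ _
      | exact h

-- one pvStep: the cell (i, c+1) becomes pvF i (c+1), everything else is unchanged
theorem pvStep_get {A B i c : Nat} {dp : Array (Array Bool)}
    (hi : 1 ≤ i) (hiA : i ≤ A) (hc : c < B)
    (h : pvInnerInv A B i c dp) :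
    ∀ i' j', pvGet2 (pvStep i (c + 1) dp) i' j' =
      if i' = i ∧ j' = c + 1 then pvF i (c + 1) else pvGet2 dp i' j' := by
  obtain ⟨hsh, hval⟩ := h
  have hlen : dp.size = A + 1 := hsh.1
  have hrow : (dp.getD i #[]).size = B + 1 := pvShape_row hsh hiA
  have hi_lt : i < dp.size := by omega
  have hj_lt : c + 1 < (dp.getD i #[]).size := by omega
  have hdpij : pvGet2 dp i (c + 1) = false := by
    rw [hval i (c + 1) hiA (by omega), if_neg (lt_irrefl i), if_neg (by omega)]
  have e1 : 1 ≤ c → pvGet2 dp (i - 1) (c - 1) = pvF (i - 1) (c - 1) := by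
    intro h1
    rw [hval (i - 1) (c - 1) (by omega) (by omega), if_pos (by omega)]
  have e2 : 2 ≤ i → pvGet2 dp (i - 2) c = pvF (i - 2) c := by
    intro h2
    rw [hval (i - 2) c (by omega) (by omega), if_pos (by omega)]
  have hrec : pvF i (c + 1) =
      ((if 2 ≤ c + 1 then pvF (i - 1) (c - 1) else false)
        || (if 2 ≤ i then pvF (i - 2) c else false)) :=
    pvF_rec i (c + 1) hi (by omega)
  intro i' j'
  unfold pvStep
  dsimp only
  have n1 : c + 1 - 1 = c := by omega
  have n2 : c + 1 - 2 = c - 1 := by omega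
  simp only [n1, n2]
  by_cases h2j : 2 ≤ c + 1 <;> by_cases h2i : 2 ≤ i
  · -- both writes happen
    rw [if_pos h2j, if_pos h2i]
    have hsh1 : pvShape A B (pvSet2 dp i (c + 1) (pvGet2 dp (i - 1) (c - 1) || pvGet2 dp i (c + 1))) :=
      pvShape_set2 hsh _ _ _
    have hrow1 : ((pvSet2 dp i (c + 1) (pvGet2 dp (i - 1) (c - 1) || pvGet2 dp i (c + 1))).getD i #[]).size = B + 1 :=
      pvShape_row hsh1 hiA
    have hlen1 : (pvSet2 dp i (c + 1) (pvGet2 dp (i - 1) (c - 1) || pvGet2 dp i (c + 1))).size = A + 1 := hsh1.1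
    by_cases htgt : i' = i ∧ j' = c + 1
    · obtain ⟨hti, htj⟩ := htgt
      subst hti; subst htj
      rw [if_pos ⟨rfl, rfl⟩]
      rw [pvGet2_set2_same (by omega) (by omega)]
      rw [pvGet2_set2_ne (Or.inl (by omega))]
      rw [pvGet2_set2_same (by omega) (by omega)]
      rw [e2 h2i, e1 (by omega), hdpij, Bool.or_false, hrec, if_pos h2j, if_pos h2i]
      exact Bool.or_comm _ _
    · rw [if_neg htgt]
      have hne : i' ≠ i ∨ j' ≠ c + 1 := by tauto
      rw [pvGet2_set2_ne hne, pvGet2_set2_ne hne]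
  · -- only the first write happens
    rw [if_pos h2j, if_neg h2i]
    by_cases htgt : i' = i ∧ j' = c + 1
    · obtain ⟨hti, htj⟩ := htgt
      subst hti; subst htj
      rw [if_pos ⟨rfl, rfl⟩]
      rw [pvGet2_set2_same (by omega) (by omega)]
      rw [e1 (by omega), hdpij, Bool.or_false, hrec, if_pos h2j, if_neg h2i, Bool.or_false]
    · rw [if_neg htgt]
      exact pvGet2_set2_ne (by tauto) _
  · -- only the second write happens (c = 0)
    rw [if_neg h2j, if_pos h2i]
    by_cases htgt : i' = i ∧ j' = c + 1
    · obtain ⟨hti, htj⟩ := htgt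
      subst hti; subst htj
      rw [if_pos ⟨rfl, rfl⟩]
      rw [pvGet2_set2_same (by omega) (by omega)]
      rw [e2 h2i, hdpij, Bool.or_false, hrec, if_neg h2j, if_pos h2i, Bool.false_or]
    · rw [if_neg htgt]
      exact pvGet2_set2_ne (by tauto) _
  · -- no write happens (c = 0 and i = 1)
    rw [if_neg h2j, if_neg h2i]
    by_cases htgt : i' = i ∧ j' = c + 1
    · obtain ⟨hti, htj⟩ := htgt
      subst hti; subst htj
      rw [if_pos ⟨rfl, rfl⟩, hdpij, hrec, if_neg h2j, if_neg h2i, Bool.or_false]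
    · rw [if_neg htgt]

theorem pvStep_inv {A B i c : Nat} {dp : Array (Array Bool)}
    (hi : 1 ≤ i) (hiA : i ≤ A) (hc : c < B)
    (h : pvInnerInv A B i c dp) :
    pvInnerInv A B i (c + 1) (pvStep i (c + 1) dp) := by
  refine ⟨pvShape_step h.1, ?_⟩
  intro i' j' hi' hj'
  rw [pvStep_get hi hiA hc h i' j']
  by_cases htgt : i' = i ∧ j' = c + 1
  · obtain ⟨hti, htj⟩ := htgt
    subst hti; subst htj
    rw [if_pos ⟨rfl, rfl⟩, if_neg (lt_irrefl i'), if_pos (by omega)]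
  · rw [if_neg htgt, h.2 i' j' hi' hj']
    split_ifs <;> first | rfl | omega

theorem pvInner_fold {A B i : Nat} (hi : 1 ≤ i) (hiA : i ≤ A) :
    ∀ (c : Nat), c ≤ B → ∀ dp, pvInnerInv A B i 0 dp →
      pvInnerInv A B i c ((List.range c).foldl (fun dp l => pvStep i (l + 1) dp) dp) := by
  intro c
  induction c with
  | zero => intro _ dp h; simpa using h
  | succ c ih =>
    intro hcB dp h
    rw [List.range_succ, List.foldl_append]
    exact pvStep_inv hi hiA (by omega) (ih (by omega) dp h)

theorem pvOuter_to_inner {A B r : Nat} {dp : Array (Array Bool)}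
    (h : pvOuterInv A B r dp) : pvInnerInv A B (r + 1) 0 dp := by
  refine ⟨h.1, ?_⟩
  intro i' j hi' hj
  rw [h.2 i' j hi' hj]
  by_cases h1 : i' ≤ r
  · rw [if_pos h1, if_pos (by omega)]
  · rw [if_neg h1, if_neg (by omega : ¬ i' < r + 1), if_neg (by omega : ¬ (i' = r + 1 ∧ 1 ≤ j ∧ j ≤ 0))]

theorem pvInner_to_outer {A B i : Nat} {dp : Array (Array Bool)} (hi : 1 ≤ i)
    (h : pvInnerInv A B i B dp) : pvOuterInv A B i dp := by
  refine ⟨h.1, ?_⟩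
  intro i' j hi' hj
  rw [h.2 i' j hi' hj]
  by_cases h1 : i' < i
  · rw [if_pos h1, if_pos (by omega)]
  · by_cases h2 : i' = i ∧ 1 ≤ j ∧ j ≤ B
    · rw [if_neg h1, if_pos h2, if_pos (by omega), h2.1]
    · rw [if_neg h1, if_neg h2]
      by_cases h3 : i' ≤ i
      · have hj0 : j = 0 := by omega
        subst hj0
        rw [if_pos h3, pvF_zero_right i' (by omega)]
      · rw [if_neg h3]

theorem pvGet2_replicate (A B i j : Nat) :
    pvGet2 (Array.replicate A (Array.replicate B false)) i j = false := by
  unfold pvGet2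
  have ho : (Array.replicate A (Array.replicate B false)).getD i #[] =
      if i < A then Array.replicate B false else #[] := by
    rw [Array.getD_eq_getD_getElem?, Array.getElem?_replicate]
    by_cases hi : i < A
    · rw [if_pos hi, if_pos hi]; rfl
    · rw [if_neg hi, if_neg hi]; rfl
  rw [ho]
  by_cases hi : i < A
  · rw [if_pos hi, Array.getD_eq_getD_getElem?, Array.getElem?_replicate]
    by_cases hj : j < B
    · rw [if_pos hj]; rfl
    · rw [if_neg hj]; rfl
  · rw [if_neg hi]
    rfl

theorem pvInit_outer (A B : Nat) :
    pvOuterInv A B 0 (pvSet2 (Array.replicate (A + 1) (Array.replicate (B + 1) false)) 0 0 true) := by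
  have hrow : ∀ k, k < A + 1 →
      ((Array.replicate (A + 1) (Array.replicate (B + 1) false)).getD k #[]) = Array.replicate (B + 1) false := by
    intro k hk
    rw [Array.getD_eq_getD_getElem?, Array.getElem?_replicate, if_pos hk]
    rfl
  have hsh0 : pvShape A B (Array.replicate (A + 1) (Array.replicate (B + 1) false)) := by
    refine ⟨by simp, ?_⟩
    intro k hk
    rw [hrow k (by simpa using hk)]
    simp
  refine ⟨pvShape_set2 hsh0 0 0 true, ?_⟩
  intro i j hiA hjB
  by_cases h00 : i = 0 ∧ j = 0
  · obtain ⟨h1, h2⟩ := h00; subst h1; subst h2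
    rw [pvGet2_set2_same (by simp) (by rw [hrow 0 (by omega)]; simp), if_pos le_rfl]
    decide
  · rw [pvGet2_set2_ne (by tauto), pvGet2_replicate]
    split_ifs with h1
    · have hi0 : i = 0 := by omega
      subst hi0
      rw [pvF, eq_comm, decide_eq_false_iff_not]
      omega
    · rfl

theorem pvTbl_outer (A B : Nat) : ∀ r, r ≤ A →
    pvOuterInv A B r ((List.range r).foldl (fun dp k =>
      (List.range B).foldl (fun dp l => pvStep (k + 1) (l + 1) dp) dp)
      (pvSet2 (Array.replicate (A + 1) (Array.replicate (B + 1) false)) 0 0 true)) := by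
  intro r
  induction r with
  | zero => intro _; simpa using pvInit_outer A B
  | succ r ih =>
    intro hrA
    rw [List.range_succ, List.foldl_append]
    simp only [List.foldl_cons, List.foldl_nil]
    exact pvInner_to_outer (by omega)
      (pvInner_fold (by omega) (by omega) B le_rfl _ (pvOuter_to_inner (ih (by omega))))

theorem pvTbl_get (A B : Nat) : pvGet2 (pvTbl A B) A B = pvF A B := by
  have h := pvTbl_outer A B A le_rfl
  rw [pvTbl]
  rw [h.2 A B le_rfl le_rfl, if_pos le_rfl]

-- the Int-level loop body of port A is the Nat-level pvStep
theorem pvBody_eq (k l : Nat) (dp : Array (Array Bool)) :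
    (let dp1 := if 1 ≤ (1 + (k : Int)) ∧ 2 ≤ (1 + (l : Int)) then
        pvSet2 dp (1 + (k : Int)).toNat (1 + (l : Int)).toNat
          (pvGet2 dp ((1 + (k : Int)) - 1).toNat ((1 + (l : Int)) - 2).toNat
            || pvGet2 dp (1 + (k : Int)).toNat (1 + (l : Int)).toNat)
      else dp
     let dp2 := if 2 ≤ (1 + (k : Int)) ∧ 1 ≤ (1 + (l : Int)) then
        pvSet2 dp1 (1 + (k : Int)).toNat (1 + (l : Int)).toNat
          (pvGet2 dp1 ((1 + (k : Int)) - 2).toNat ((1 + (l : Int)) - 1).toNat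
            || pvGet2 dp1 (1 + (k : Int)).toNat (1 + (l : Int)).toNat)
      else dp1
     dp2) = pvStep (k + 1) (l + 1) dp := by
  have t1 : ((1 : Int) + k).toNat = k + 1 := by omega
  have t2 : (((1 : Int) + k) - 1).toNat = k := by omega
  have t3 : (((1 : Int) + l) - 2).toNat = l - 1 := by omega
  have t4 : (((1 : Int) + k) - 2).toNat = k - 1 := by omega
  have t5 : (((1 : Int) + l) - 1).toNat = l := by omega
  have t6 : ((1 : Int) + l).toNat = l + 1 := by omega
  have g1 : (1 ≤ (1 + (k : Int)) ∧ 2 ≤ (1 + (l : Int))) ↔ 2 ≤ l + 1 := by omega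
  have g2 : (2 ≤ (1 + (k : Int)) ∧ 1 ≤ (1 + (l : Int))) ↔ 2 ≤ k + 1 := by omega
  unfold pvStep
  dsimp only
  simp only [t1, t2, t3, t4, t5, t6, if_congr g1 rfl rfl, if_congr g2 rfl rfl]
  have hsub1 : k + 1 - 1 = k := by omega
  have hsub2 : l + 1 - 2 = l - 1 := by omega
  have hsub3 : k + 1 - 2 = k - 1 := by omega
  have hsub4 : l + 1 - 1 = l := by omega
  simp only [hsub1, hsub2, hsub3, hsub4]

-- port A computes the table read pvGet2 (pvTbl A B) A B
theorem pvA_eq_tbl (a b : Int) (ha : 0 ≤ a) (hb : 0 ≤ b) :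
    can_empty_piles a b = pvGet2 (pvTbl a.toNat b.toNat) a.toNat b.toNat := by
  unfold can_empty_piles pvTbl
  dsimp only
  have hta : ((a : Int) + 1 - 1).toNat = a.toNat := by omega
  have htb : ((b : Int) + 1 - 1).toNat = b.toNat := by omega
  have ha1 : (a + 1).toNat = a.toNat + 1 := by omega
  have hb1 : (b + 1).toNat = b.toNat + 1 := by omega
  simp only [PySem.List.pyRange_one, hta, htb, ha1, hb1, List.foldl_map]
  congr 1
  apply PySem.List.foldl_congr_mem
  intro dp k _
  apply PySem.List.foldl_congr_mem
  intro dp' l _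
  exact pvBody_eq k l dp'

-- port B computes pvF
theorem pvB_eq_F (a b : Int) (ha : 0 ≤ a) (hb : 0 ≤ b) :
    can_empty_piles_alt a b = pvF a.toNat b.toNat := by
  unfold can_empty_piles_alt pvF
  rw [PySem.Int.mod_eq_emod_of_pos (by norm_num), Bool.eq_iff_iff]
  simp only [Bool.and_eq_true, beq_iff_eq, decide_eq_true_eq]
  omega

-- ===== VERDICT (by name: the statement is the Claim_ definition above) =====
theorem can_empty_piles_spec : Claim_equal_can_empty_piles := by
  intro a b _ hpre
  obtain ⟨ha, hb⟩ := hpre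
  unfold Spec_can_empty_piles
  rw [pvA_eq_tbl a b ha hb, pvB_eq_F a b ha hb, pvTbl_get]

-- proof of Claim_raises_can_empty_piles (a `def` of the Prop: the file linter's
-- unused-theorem scan does not know the optional raises-verdict name)
def can_empty_piles_raises : Claim_raises_can_empty_piles := by
  unfold Claim_raises_can_empty_piles
  constructor
  · intro a b _ hr hp
    unfold Raises_can_empty_piles at hr
    unfold Pre_can_empty_piles at hp
    omega
  · refine ⟨by decide, by decide, by decide⟩
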